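-- pv_equiv track=rewrite | github.com/shyam-DSA/dp-problems-table-generator | knapsack_react_flask/backend/app.py | solve_scs_steps
-- ===== SOURCE A (Python) =====
-- import copy
--
-- def solve_scs_steps(s1, s2):
--     m, n = len(s1), len(s2)
--     dp = [[0] * (n + 1) for _ in range(m + 1)]
--     steps = []
--     coords = []
--     for i in range(m + 1):
--         dp[i][0] = i
--         steps.append(copy.deepcopy(dp))
--         coords.append((i, 0))
--     for j in range(1, n + 1):
--         dp[0][j] = j
--         steps.append(copy.deepcopy(dp))
--         coords.append((0, j))
--     for i in range(1, m + 1):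
--         for j in range(1, n + 1):
--             if s1[i - 1] == s2[j - 1]:
--                 dp[i][j] = dp[i - 1][j - 1] + 1
--             else:
--                 dp[i][j] = min(dp[i - 1][j], dp[i][j - 1]) + 1
--             steps.append(copy.deepcopy(dp))
--             coords.append((i, j))
--     return dp, steps, coords
-- ===== SOURCE B (Python) =====
-- def solve_scs_steps(s1, s2):
--     m, n = len(s1), len(s2)
--     # pass 1: solve the DP completely, no snapshots; base cases built directly
--     dp = [[i] + [0] * n for i in range(m + 1)]
--     dp[0] = list(range(n + 1))
--     for i in range(1, m + 1):
--         up, row = dp[i - 1], dp[i]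
--         for j in range(1, n + 1):
--             row[j] = up[j - 1] + 1 if s1[i - 1] == s2[j - 1] else min(up[j], row[j - 1]) + 1
--     # fill order: column 0, then row 0, then interior row-major
--     coords = [(i, 0) for i in range(m + 1)] \
--            + [(0, j) for j in range(1, n + 1)] \
--            + [(i, j) for i in range(1, m + 1) for j in range(1, n + 1)]
--     # pass 2: replay the fill order, snapshotting a fresh grid after each write
--     grid = [[0] * (n + 1) for _ in range(m + 1)]
--     steps = []
--     for (i, j) in coords:
--         grid[i][j] = dp[i][j]
--         steps.append([row[:] for row in grid])
--     return dp, steps, coords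
-- ===== Notes on version B (the rewrite author's own statement) =====
-- stated objective: alternative
-- what changed: A interleaves the DP computation with a deep-copied snapshot after every single cell write; B separates solver from recorder: it builds the base rows directly by comprehension, runs the interior SCS recurrence to completion with no snapshots, builds the fill-order coordinate list by comprehensions, and a second replay pass writes the precomputed final values into a fresh zero grid, snapshotting after each write.
import Mathlib
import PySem

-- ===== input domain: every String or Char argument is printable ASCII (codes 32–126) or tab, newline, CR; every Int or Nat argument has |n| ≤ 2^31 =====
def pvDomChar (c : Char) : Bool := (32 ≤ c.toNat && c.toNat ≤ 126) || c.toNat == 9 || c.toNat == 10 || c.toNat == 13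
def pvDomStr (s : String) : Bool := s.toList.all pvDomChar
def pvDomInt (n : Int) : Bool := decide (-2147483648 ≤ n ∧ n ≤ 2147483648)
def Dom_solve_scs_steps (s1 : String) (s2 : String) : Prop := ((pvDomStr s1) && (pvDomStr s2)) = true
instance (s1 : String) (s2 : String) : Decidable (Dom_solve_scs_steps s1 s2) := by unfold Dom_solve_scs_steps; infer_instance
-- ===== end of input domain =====

-- B separates the solver from the step recorder: one pass fills the DP table with no
-- snapshots, a second pass replays the fill order writing final values into a fresh grid
-- and snapshotting after each write (objective: alternative decomposition, not faster).

-- shared grid primitives (dp[i][j] read / write on a list-of-lists grid)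
def pvGet (g : List (List Int)) (i j : Nat) : Int := (g.getD i []).getD j 0
def pvSet (g : List (List Int)) (i j : Nat) (v : Int) : List (List Int) :=
  g.set i ((g.getD i []).set j v)

-- ===== PORT A =====
def solve_scs_steps (s1 : String) (s2 : String) :
    List (List Int) × List (List (List Int)) × (List (Int × Int)) :=
  let m := s1.length
  let n := s2.length
  let dp0 : List (List Int) := List.replicate (m+1) (List.replicate (n+1) (0:Int))
  -- for i in range(m+1): dp[i][0] = i; snapshot; record (i,0)
  let t1 := (List.range (m+1)).foldl
    (fun (s : List (List Int) × List (List (List Int)) × List (Int × Int)) i =>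
      let dp := pvSet s.1 i 0 (i:Int)
      (dp, s.2.1 ++ [dp], s.2.2 ++ [((i:Int), 0)])) (dp0, [], [])
  -- for j in range(1, n+1): dp[0][j] = j; snapshot; record (0,j)
  let t2 := (List.range' 1 n).foldl
    (fun (s : List (List Int) × List (List (List Int)) × List (Int × Int)) j =>
      let dp := pvSet s.1 0 j (j:Int)
      (dp, s.2.1 ++ [dp], s.2.2 ++ [(0, (j:Int))])) t1
  -- interior double loop, snapshot after each cell
  let t3 := (List.range' 1 m).foldl
    (fun (s : List (List Int) × List (List (List Int)) × List (Int × Int)) i =>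
      (List.range' 1 n).foldl
        (fun (s : List (List Int) × List (List (List Int)) × List (Int × Int)) j =>
          let v := if s1.toList.getD (i-1) ' ' == s2.toList.getD (j-1) ' '
                   then pvGet s.1 (i-1) (j-1) + 1
                   else min (pvGet s.1 (i-1) j) (pvGet s.1 i (j-1)) + 1
          let dp := pvSet s.1 i j v
          (dp, s.2.1 ++ [dp], s.2.2 ++ [((i:Int), (j:Int))])) s) t2
  t3

-- ===== PORT B =====
def solve_scs_steps_alt (s1 : String) (s2 : String) :
    List (List Int) × List (List (List Int)) × (List (Int × Int)) :=
  let m := s1.length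
  let n := s2.length
  -- pass 1: base cases built directly, then the interior recurrence, no snapshots
  let dp0 : List (List Int) :=
    ((List.range (m+1)).map (fun i => Int.ofNat i :: List.replicate n (0:Int))).set 0
      ((List.range (n+1)).map (fun j => Int.ofNat j))
  let dpF := (List.range' 1 m).foldl
    (fun g i => (List.range' 1 n).foldl
      (fun g j =>
        pvSet g i j
          (if s1.toList.getD (i-1) ' ' == s2.toList.getD (j-1) ' '
           then pvGet g (i-1) (j-1) + 1
           else min (pvGet g (i-1) j) (pvGet g i (j-1)) + 1)) g) dp0
  -- fill order: column 0, then row 0, then interior row-major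
  let coords : List (Nat × Nat) :=
    (List.range (m+1)).map (fun i => (i, 0))
      ++ (List.range' 1 n).map (fun j => (0, j))
      ++ (List.range' 1 m).flatMap (fun i => (List.range' 1 n).map (fun j => (i, j)))
  -- pass 2: replay the fill order on a fresh zero grid, snapshotting after each write
  let grid0 : List (List Int) := List.replicate (m+1) (List.replicate (n+1) (0:Int))
  let rep := coords.foldl
    (fun (s : List (List Int) × List (List (List Int))) c =>
      let g := pvSet s.1 c.1 c.2 (pvGet dpF c.1 c.2)
      (g, s.2 ++ [g])) (grid0, [])
  (dpF, rep.2, coords.map (fun c => ((c.1:Int), (c.2:Int))))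

-- ===== PRECONDITION & SPEC =====
def Spec_solve_scs_steps (s1 : String) (s2 : String) (out : List (List Int) × List (List (List Int)) × (List (Int × Int))) : Prop := out = solve_scs_steps_alt s1 s2
instance (s1 : String) (s2 : String) (out : List (List Int) × List (List (List Int)) × (List (Int × Int))) : Decidable (Spec_solve_scs_steps s1 s2 out) := by unfold Spec_solve_scs_steps; infer_instance

-- ===== CLAIM (what is proved, stated in full; the proofs are below) =====
def Claim_equal_solve_scs_steps : Prop := ∀ (s1 : String) (s2 : String), Dom_solve_scs_steps s1 s2 → Spec_solve_scs_steps s1 s2 (solve_scs_steps s1 s2)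

-- ===== LEMMAS AND PROOFS =====

-- the value A writes at cell c given the current grid (uniform over the three loops)
def pvVal (c1 c2 : List Char) (g : List (List Int)) (c : Nat × Nat) : Int :=
  if c.2 = 0 then (c.1 : Int)
  else if c.1 = 0 then (c.2 : Int)
  else if c1.getD (c.1-1) ' ' == c2.getD (c.2-1) ' ' then pvGet g (c.1-1) (c.2-1) + 1
  else min (pvGet g (c.1-1) c.2) (pvGet g c.1 (c.2-1)) + 1

def pvStep (c1 c2 : List Char) (g : List (List Int)) (c : Nat × Nat) : List (List Int) :=
  pvSet g c.1 c.2 (pvVal c1 c2 g c)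

def pvFoldP (c1 c2 : List Char) (g : List (List Int)) (cs : List (Nat × Nat)) : List (List Int) :=
  cs.foldl (pvStep c1 c2) g

def pvStepA (c1 c2 : List Char)
    (s : List (List Int) × List (List (List Int)) × List (Int × Int)) (c : Nat × Nat) :
    List (List Int) × List (List (List Int)) × List (Int × Int) :=
  let dp := pvStep c1 c2 s.1 c
  (dp, s.2.1 ++ [dp], s.2.2 ++ [((c.1:Int), (c.2:Int))])

theorem length_pvSet (g : List (List Int)) (i j : Nat) (v : Int) :
    (pvSet g i j v).length = g.length := by simp [pvSet]

theorem getD_pvSet_row (g : List (List Int)) (i j : Nat) (v : Int) (k : Nat) :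
    ((pvSet g i j v).getD k []).length = (g.getD k []).length := by
  unfold pvSet
  by_cases h : i = k
  · subst h
    by_cases hk : i < g.length
    · simp [List.getD_eq_getElem?_getD, List.getElem?_set_self hk]
    · rw [List.set_eq_of_length_le (Nat.le_of_not_lt hk)]
  · simp [List.getD_eq_getElem?_getD, List.getElem?_set_ne h]

theorem pvGet_pvSet_ne (g : List (List Int)) (i j i' j' : Nat) (v : Int)
    (h : (i, j) ≠ (i', j')) : pvGet (pvSet g i' j' v) i j = pvGet g i j := by
  unfold pvGet pvSet
  by_cases hi : i' = i
  · subst hi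
    have hj : j' ≠ j := by intro hh; exact h (by rw [hh])
    by_cases hk : i' < g.length
    · simp [List.getD_eq_getElem?_getD, List.getElem?_set_self hk,
        List.getElem?_set_ne hj]
    · rw [List.set_eq_of_length_le (Nat.le_of_not_lt hk)]
  · simp [List.getD_eq_getElem?_getD, List.getElem?_set_ne hi]

theorem pvGet_pvSet_self (g : List (List Int)) (i j : Nat) (v : Int)
    (hi : i < g.length) (hj : j < (g.getD i []).length) :
    pvGet (pvSet g i j v) i j = v := by
  unfold pvGet pvSet
  rw [List.getD_eq_getElem?_getD] at hj
  simp [List.getD_eq_getElem?_getD, List.getElem?_set_self hi, List.getElem?_set_self hj]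

theorem pvGet_pvFoldP_notmem (c1 c2 : List Char) (cs : List (Nat × Nat)) :
    ∀ (g : List (List Int)) (c : Nat × Nat), c ∉ cs →
      pvGet (pvFoldP c1 c2 g cs) c.1 c.2 = pvGet g c.1 c.2 := by
  induction cs with
  | nil => intro g c _; rfl
  | cons d cs ih =>
    intro g c hc
    have h1 : c ≠ d := fun h => hc (by simp [h])
    have h2 : c ∉ cs := fun h => hc (by simp [h])
    calc pvGet (pvFoldP c1 c2 (pvStep c1 c2 g d) cs) c.1 c.2
        = pvGet (pvStep c1 c2 g d) c.1 c.2 := ih _ _ h2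
      _ = pvGet g c.1 c.2 := pvGet_pvSet_ne _ _ _ _ _ _ (by
            intro h; exact h1 (Prod.ext (congrArg Prod.fst h) (congrArg Prod.snd h)))

theorem foldA_fst (c1 c2 : List Char) (cs : List (Nat × Nat)) :
    ∀ g st co, (cs.foldl (pvStepA c1 c2) (g, st, co)).1 = pvFoldP c1 c2 g cs := by
  induction cs with
  | nil => intro g st co; rfl
  | cons d cs ih => intro g st co; simpa [pvStepA, pvFoldP, List.foldl_cons] using ih _ _ _

theorem foldA_coords (c1 c2 : List Char) (cs : List (Nat × Nat)) :
    ∀ g st co, (cs.foldl (pvStepA c1 c2) (g, st, co)).2.2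
      = co ++ cs.map (fun c => ((c.1:Int), (c.2:Int))) := by
  induction cs with
  | nil => intro g st co; simp
  | cons d cs ih => intro g st co; simp [pvStepA, List.foldl_cons, ih]

-- the replay pass reproduces the grids and snapshots of the one-pass fold,
-- provided the coords are distinct and in bounds
theorem replay_eq (c1 c2 : List Char) (G : List (List Int)) (cs : List (Nat × Nat)) :
    ∀ (g : List (List Int)) (st : List (List (List Int))) (co : List (Int × Int)),
      G = pvFoldP c1 c2 g cs → cs.Nodup →
      (∀ c ∈ cs, c.1 < g.length ∧ c.2 < (g.getD c.1 []).length) →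
      cs.foldl (fun (s : List (List Int) × List (List (List Int))) c =>
          (pvSet s.1 c.1 c.2 (pvGet G c.1 c.2),
           s.2 ++ [pvSet s.1 c.1 c.2 (pvGet G c.1 c.2)])) (g, st)
        = ((cs.foldl (pvStepA c1 c2) (g, st, co)).1,
           (cs.foldl (pvStepA c1 c2) (g, st, co)).2.1) := by
  induction cs with
  | nil => intro g st co _ _ _; rfl
  | cons d cs ih =>
    intro g st co hG hnd hb
    have hd : d ∉ cs := by simp at hnd; exact hnd.1
    have hbd := hb d (by simp)
    have hGd : pvGet G d.1 d.2 = pvVal c1 c2 g d := by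
      rw [hG]
      show pvGet (pvFoldP c1 c2 (pvStep c1 c2 g d) cs) d.1 d.2 = _
      rw [pvGet_pvFoldP_notmem c1 c2 cs _ d hd]
      exact pvGet_pvSet_self _ _ _ _ hbd.1 hbd.2
    have hstep : pvSet g d.1 d.2 (pvGet G d.1 d.2) = pvStep c1 c2 g d := by
      rw [hGd]; rfl
    simp only [List.foldl_cons, hstep]
    exact ih (pvStep c1 c2 g d) (st ++ [pvStep c1 c2 g d]) (co ++ [((d.1:Int),(d.2:Int))])
      (by rw [hG]; rfl) (by simp at hnd; exact hnd.2)
      (by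
        intro c hc
        have := hb c (by simp [hc])
        constructor
        · rw [pvStep, length_pvSet]; exact this.1
        · rw [pvStep, getD_pvSet_row]; exact this.2)

def pvDp0 (m n : Nat) : List (List Int) :=
  List.replicate (m+1) (List.replicate (n+1) (0:Int))

def pvCoords (m n : Nat) : List (Nat × Nat) :=
  (List.range (m+1)).map (fun i => (i, 0))
    ++ (List.range' 1 n).map (fun j => (0, j))
    ++ (List.range' 1 m).flatMap (fun i => (List.range' 1 n).map (fun j => (i, j)))

theorem foldl_flatMap {A B C : Type} (l : List A) (f : A → List B) (g : C → B → C) (init : C) :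
    (l.flatMap f).foldl g init = l.foldl (fun s a => (f a).foldl g s) init := by
  induction l generalizing init with
  | nil => rfl
  | cons x xs ih => simp [List.foldl_append, ih]

theorem ite_cast_zero (j : Nat) : (if j = 0 then (0:Int) else (j:Int)) = (j:Int) := by
  split <;> simp_all

theorem coords_nodup (m n : Nat) : (pvCoords m n).Nodup := by
  unfold pvCoords
  have h1 : ((List.range (m+1)).map (fun i => ((i:Nat), (0:Nat)))).Nodup :=
    (List.nodup_range).map (fun a b h => by simpa using congrArg Prod.fst h)
  have h2 : ((List.range' 1 n).map (fun j => ((0:Nat), (j:Nat)))).Nodup :=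
    (List.nodup_range' 1).map (fun a b h => by simpa using congrArg Prod.snd h)
  have h3 : ((List.range' 1 m).flatMap
      (fun i => (List.range' 1 n).map (fun j => ((i:Nat), (j:Nat))))).Nodup := by
    rw [List.nodup_flatMap]
    constructor
    · intro x _
      exact (List.nodup_range' 1).map (fun a b h => by simpa using congrArg Prod.snd h)
    · have hr : (List.range' 1 m).Nodup := List.nodup_range' 1
      refine hr.imp ?_
      intro a b hab
      simp only [Function.onFun, List.disjoint_left]
      intro c hc hc'
      simp only [List.mem_map] at hc hc'
      obtain ⟨j1, _, rfl⟩ := hc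
      obtain ⟨j2, _, h⟩ := hc'
      exact hab (by simpa using (congrArg Prod.fst h).symm)
  refine List.Nodup.append (List.Nodup.append h1 h2 ?_) h3 ?_
  · intro c hc hc'
    simp only [List.mem_map, List.mem_range, List.mem_range'_1] at hc hc'
    obtain ⟨i, _, rfl⟩ := hc
    obtain ⟨j, hj, h⟩ := hc'
    have := congrArg Prod.snd h
    simp at this
    omega
  · intro c hc hc'
    simp only [List.mem_append, List.mem_map, List.mem_flatMap, List.mem_range,
      List.mem_range'_1] at hc hc'
    obtain ⟨i, hi, j, hj, rfl⟩ := hc'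
    rcases hc with ⟨a, _, h⟩ | ⟨b, hb, h⟩
    · have := congrArg Prod.snd h
      simp at this
      omega
    · have := congrArg Prod.fst h
      simp at this
      omega

theorem coords_bounds (m n : Nat) : ∀ c ∈ pvCoords m n,
    c.1 < (pvDp0 m n).length ∧ c.2 < ((pvDp0 m n).getD c.1 []).length := by
  intro c hc
  have hcb : c.1 < m + 1 ∧ c.2 < n + 1 := by
    unfold pvCoords at hc
    simp only [List.mem_append, List.mem_map, List.mem_flatMap, List.mem_range,
      List.mem_range'_1] at hc
    rcases hc with (⟨i, hi, rfl⟩ | ⟨j, hj, rfl⟩) | ⟨i, hi, hij⟩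
    · simp; omega
    · simp; omega
    · obtain ⟨j, hj, rfl⟩ := hij
      simp; omega
  unfold pvDp0
  constructor
  · simpa using hcb.1
  · rw [List.getD_eq_getElem?_getD, List.getElem?_replicate]
    simp [hcb.1, hcb.2]

theorem fuseA (s1 s2 : String) :
    solve_scs_steps s1 s2
      = (pvCoords s1.length s2.length).foldl (pvStepA s1.toList s2.toList)
          (pvDp0 s1.length s2.length, [], []) := by
  simp only [solve_scs_steps]
  unfold pvCoords
  rw [List.foldl_append, List.foldl_append]
  simp only [List.foldl_map, foldl_flatMap]
  simp [pvStepA, pvStep, pvVal, ite_cast_zero]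
  refine PySem.List.foldl_congr_mem _ _ _ _ ?_
  intro acc x hx
  rw [List.mem_range'_1] at hx
  refine PySem.List.foldl_congr_mem _ _ _ _ ?_
  intro acc2 y hy
  rw [List.mem_range'_1] at hy
  simp [show ¬ y = 0 by omega, show ¬ x = 0 by omega]

theorem row_pvSet (g : List (List Int)) (i j : Nat) (v : Int) (k : Nat) :
    (pvSet g i j v).getD k [] =
      if i = k ∧ k < g.length then (g.getD k []).set j v else g.getD k [] := by
  unfold pvSet
  by_cases h : i = k
  · subst h
    by_cases hk : i < g.length
    · simp [List.getD_eq_getElem?_getD, List.getElem?_set_self hk, hk,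
        List.getElem?_eq_getElem hk]
    · rw [List.set_eq_of_length_le (Nat.le_of_not_lt hk)]
      simp [hk]
  · simp [List.getD_eq_getElem?_getD, List.getElem?_set_ne h, h]

theorem row0_pvSet (g : List (List Int)) (j : Nat) (v : Int) :
    (pvSet g 0 j v).getD 0 [] = (g.getD 0 []).set j v := by
  cases g with
  | nil => simp [pvSet]
  | cons r t => simp [pvSet]

theorem stage1_rows (l : List Nat) : ∀ (g : List (List Int)) (k : Nat),
    (l.foldl (fun g i => pvSet g i 0 (i:Int)) g).getD k [] =
      if k ∈ l ∧ k < g.length then (g.getD k []).set 0 (k:Int) else g.getD k [] := by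
  induction l with
  | nil => intro g k; simp
  | cons a l ih =>
    intro g k
    rw [List.foldl_cons, ih, row_pvSet, length_pvSet]
    by_cases hak : a = k
    · subst hak
      by_cases hk : a < g.length
      · by_cases hl : a ∈ l <;> simp [hk, hl, List.set_set]
      · by_cases hl : a ∈ l <;> simp [hk, hl]
    · by_cases hk : k ∈ l <;> by_cases hl : k < g.length <;>
        simp [hak, hk, hl] <;> (intro h; exact absurd h.symm hak)

theorem rowsets_cells (l : List Nat) : ∀ (r : List Int) (k : Nat),
    (l.foldl (fun r j => r.set j (j:Int)) r).getD k 0 =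
      if k ∈ l ∧ k < r.length then (k:Int) else r.getD k 0 := by
  induction l with
  | nil => intro r k; simp
  | cons a l ih =>
    intro r k
    rw [List.foldl_cons, ih, List.length_set]
    by_cases hak : a = k
    · subst hak
      by_cases hk : a < r.length
      · by_cases hl : a ∈ l <;>
          simp [hk, hl, List.getD_eq_getElem?_getD, List.getElem?_set_self hk]
      · by_cases hl : a ∈ l <;>
          simp [hk, hl, List.set_eq_of_length_le (Nat.le_of_not_lt hk)]
    · by_cases hk : k ∈ l <;> by_cases hl : k < r.length <;>
        simp [hak, hk, hl, List.getD_eq_getElem?_getD] <;> (intro h; exact absurd h.symm hak)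

theorem rowsets_length (l : List Nat) : ∀ (r : List Int),
    (l.foldl (fun r j => r.set j (j:Int)) r).length = r.length := by
  induction l with
  | nil => intro r; rfl
  | cons a l ih => intro r; rw [List.foldl_cons, ih, List.length_set]

theorem stage2_rows (l : List Nat) : ∀ (g : List (List Int)) (k : Nat),
    (l.foldl (fun g j => pvSet g 0 j (j:Int)) g).getD k [] =
      if k = 0 then l.foldl (fun r j => r.set j (j:Int)) (g.getD 0 []) else g.getD k [] := by
  induction l with
  | nil => intro g k; by_cases hk : k = 0 <;> simp [hk]
  | cons a l ih =>
    intro g k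
    rw [List.foldl_cons, ih, List.foldl_cons]
    by_cases hk : k = 0
    · subst hk; rw [row0_pvSet]; simp
    · simp only [row_pvSet]
      simp [hk, show ¬ (0 = k) from fun h => hk h.symm]

theorem stage1_length (l : List Nat) : ∀ (g : List (List Int)),
    (l.foldl (fun g i => pvSet g i 0 (i:Int)) g).length = g.length := by
  induction l with
  | nil => intro g; rfl
  | cons a l ih => intro g; rw [List.foldl_cons, ih, length_pvSet]

theorem stage2_length (l : List Nat) : ∀ (g : List (List Int)),
    (l.foldl (fun g j => pvSet g 0 j (j:Int)) g).length = g.length := by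
  induction l with
  | nil => intro g; rfl
  | cons a l ih => intro g; rw [List.foldl_cons, ih, length_pvSet]

theorem pvDp0_row (m n k : Nat) (hk : k < m + 1) :
    (pvDp0 m n).getD k [] = List.replicate (n+1) (0:Int) := by
  unfold pvDp0
  rw [List.getD_eq_getElem?_getD, List.getElem?_replicate]
  simp [hk]

theorem baseGrid (m n : Nat) :
    (List.range' 1 n).foldl (fun g j => pvSet g 0 j (j:Int))
        ((List.range (m+1)).foldl (fun g i => pvSet g i 0 (i:Int)) (pvDp0 m n))
      = ((List.range (m+1)).map (fun i => Int.ofNat i :: List.replicate n (0:Int))).set 0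
          ((List.range (n+1)).map (fun j => Int.ofNat j)) := by
  have hlen1 : ((List.range (m+1)).foldl (fun g i => pvSet g i 0 (i:Int)) (pvDp0 m n)).length
      = m + 1 := by rw [stage1_length]; simp [pvDp0]
  have hrow0 : ((List.range (m+1)).foldl (fun g i => pvSet g i 0 (i:Int)) (pvDp0 m n)).getD 0 []
      = (0:Int) :: List.replicate n 0 := by
    rw [stage1_rows]
    simp [pvDp0, List.replicate_succ]
  have hgetD : ∀ (l : List (List Int)) (k : Nat) (h : k < l.length), l[k]'h = l.getD k [] := by
    intro l k h
    simp [List.getD_eq_getElem?_getD, List.getElem?_eq_getElem h]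
  have hgetDI : ∀ (l : List Int) (k : Nat) (h : k < l.length), l[k]'h = l.getD k 0 := by
    intro l k h
    simp [List.getD_eq_getElem?_getD, List.getElem?_eq_getElem h]
  have hmapj : ∀ (N j : Nat) (h : j < ((List.range N).map (fun x => Int.ofNat x)).length),
      ((List.range N).map (fun x => Int.ofNat x))[j]'h = (j:Int) := by
    intro N j h
    simp only [List.getElem_map, List.getElem_range]
    simp
  apply List.ext_getElem
  · rw [stage2_length, hlen1]; simp
  · intro k h1 h2
    have h2' : k < m + 1 := by
      have := h1; rw [stage2_length, hlen1] at this; exact this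
    rw [hgetD _ _ h1, hgetD _ _ h2, stage2_rows]
    by_cases hk : k = 0
    · subst hk
      rw [if_pos rfl, hrow0]
      rw [List.getD_eq_getElem?_getD,
        List.getElem?_set_self (by simpa using (show (0:Nat) < m + 1 by omega))]
      simp only [Option.getD_some]
      apply List.ext_getElem
      · rw [rowsets_length]; simp
      · intro j hj1 hj2
        have hj : j < n + 1 := by simpa using hj2
        rw [hgetDI _ _ hj1, rowsets_cells, hmapj]
        by_cases hj0 : j = 0
        · subst hj0
          simp [List.mem_range'_1]
        · simp [List.mem_range'_1, show 1 ≤ j by omega, show j < 1 + n by omega, hj]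
    · rw [if_neg hk, stage1_rows]
      have hkr : k ∈ List.range (m+1) := by simp; omega
      have hlen0 : k < (pvDp0 m n).length := by simp [pvDp0]; omega
      rw [if_pos ⟨hkr, hlen0⟩, pvDp0_row m n k h2']
      rw [List.getD_eq_getElem?_getD, List.getElem?_set_ne (fun h => hk h.symm)]
      simp only [List.getElem?_map, List.getElem?_range, h2', if_pos, if_true, reduceIte,
        Option.map_some, Option.getD_some]
      simp [List.replicate_succ, h2']

theorem fuseB (s1 s2 : String) :
    (List.range' 1 s1.length).foldl
      (fun g i => (List.range' 1 s2.length).foldl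
        (fun g j =>
          pvSet g i j
            (if s1.toList.getD (i-1) ' ' == s2.toList.getD (j-1) ' '
             then pvGet g (i-1) (j-1) + 1
             else min (pvGet g (i-1) j) (pvGet g i (j-1)) + 1)) g)
      (((List.range (s1.length+1)).map (fun i => Int.ofNat i :: List.replicate s2.length (0:Int))).set 0
        ((List.range (s2.length+1)).map (fun j => Int.ofNat j)))
    = pvFoldP s1.toList s2.toList (pvDp0 s1.length s2.length)
        (pvCoords s1.length s2.length) := by
  rw [← baseGrid s1.length s2.length]
  unfold pvCoords pvFoldP
  rw [List.foldl_append, List.foldl_append]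
  simp only [List.foldl_map, foldl_flatMap]
  simp [pvStep, pvVal, ite_cast_zero]
  refine PySem.List.foldl_congr_mem _ _ _ _ ?_
  intro acc x hx
  rw [List.mem_range'_1] at hx
  refine PySem.List.foldl_congr_mem _ _ _ _ ?_
  intro acc2 y hy
  rw [List.mem_range'_1] at hy
  simp [show ¬ y = 0 by omega, show ¬ x = 0 by omega]

theorem solve_scs_steps_spec : Claim_equal_solve_scs_steps := by
  intro s1 s2 _
  unfold Spec_solve_scs_steps
  rw [fuseA s1 s2]
  simp only [solve_scs_steps_alt]
  rw [show List.replicate (s1.length+1) (List.replicate (s2.length+1) (0:Int))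
        = pvDp0 s1.length s2.length from rfl]
  rw [show (List.range (s1.length+1)).map (fun i => (i, 0))
        ++ (List.range' 1 s2.length).map (fun j => (0, j))
        ++ (List.range' 1 s1.length).flatMap
             (fun i => (List.range' 1 s2.length).map (fun j => (i, j)))
        = pvCoords s1.length s2.length from rfl]
  rw [fuseB s1 s2]
  have hrep := replay_eq s1.toList s2.toList
    (pvFoldP s1.toList s2.toList (pvDp0 s1.length s2.length) (pvCoords s1.length s2.length))
    (pvCoords s1.length s2.length) (pvDp0 s1.length s2.length) [] [] rfl
    (coords_nodup s1.length s2.length) (coords_bounds s1.length s2.length)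
  refine Prod.ext ?_ (Prod.ext ?_ ?_)
  · rw [foldA_fst]
  · have h2 := congrArg Prod.snd hrep
    simpa using h2.symm
  · rw [foldA_coords]; simp
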